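-- pv_equiv track=rewrite | github.com/Edifice-Ed/txt-file-reverse | text_to_angelic.py | flip_words_in_line
-- ===== SOURCE A (Python) =====
-- def flip_words_in_line(line):
--     edited_line = []
--     #we accept the definition that a word is some letters surrounded by a gap, therefore xnopyt, AAAAAAAAAAAAAAAA--
--     for word in line.split(" "):
--         for punctuation in ".,!?-–_;—\"\“":
--             word = word.replace(punctuation,"")
--         edited_line.append(word[::-1].lower())
--     edited_line = " ".join(edited_line)
--     return edited_line
-- ===== SOURCE B (Python) =====
-- PUNCT = set(".,!?-\u2013_;\u2014\"\\\u201c")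
--
-- def flip_words_in_line(line):
--     return " ".join(
--         "".join(ch.lower() for ch in reversed(word) if ch not in PUNCT)
--         for word in line.split(" ")
--     )
-- ===== Notes on version B (the rewrite author's own statement) =====
-- stated objective: simpler
-- what changed: Instead of twelve whole-word str.replace passes (one per punctuation symbol) per word, B makes a single reversed character-level pass per word, filtering characters against a punctuation set and lowercasing as it goes.
import Mathlib
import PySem

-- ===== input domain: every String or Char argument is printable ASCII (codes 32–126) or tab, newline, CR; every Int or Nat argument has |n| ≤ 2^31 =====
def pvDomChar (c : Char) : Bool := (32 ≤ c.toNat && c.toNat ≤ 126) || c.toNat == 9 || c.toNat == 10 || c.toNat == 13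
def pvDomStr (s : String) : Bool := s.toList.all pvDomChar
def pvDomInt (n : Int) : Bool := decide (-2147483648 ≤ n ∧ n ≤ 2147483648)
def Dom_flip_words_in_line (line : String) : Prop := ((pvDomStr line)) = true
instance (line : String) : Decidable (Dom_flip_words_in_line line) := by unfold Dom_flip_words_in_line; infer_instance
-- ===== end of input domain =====

-- B replaces A's per-word loop over punctuation symbols (repeated whole-word replace scans)
-- by one reversed character pass filtering against a punctuation set; objective: simpler.

-- ===== PORT A =====
-- the Python literal ".,!?-–_;—\"\“" : '\“' is no escape, so it contributes '\' and '“'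
def punctA : List Char := ['.', ',', '!', '?', '-', '–', '_', ';', '—', '"', '\\', '“']

def flip_words_in_line (line : String) : String :=
  let edited_line :=
    (PySem.Chars.splitOn line.toList [' ']).foldl (fun acc word =>
      acc ++ [PySem.Chars.lower ((PySem.Chars.slice?
        (punctA.foldl (fun w p => PySem.Chars.replace w [p] []) word) none none (-1)).getD [])]) []
  String.ofList (PySem.Chars.join [' '] edited_line)

-- ===== PORT B =====
def punctB : PySem.Set Char :=
  PySem.Set.ofList ['.', ',', '!', '?', '-', '–', '_', ';', '—', '"', '\\', '“']

def flip_words_in_line_alt (line : String) : String :=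
  String.ofList (PySem.Chars.join [' ']
    ((PySem.Chars.splitOn line.toList [' ']).map (fun w =>
      (w.reverse.filter (fun c => !(PySem.Set.contains punctB c))).map PySem.Chars.lowerChar)))

-- ===== PRECONDITION & SPEC =====
def Spec_flip_words_in_line (line : String) (out : String) : Prop := out = flip_words_in_line_alt line
instance (line : String) (out : String) : Decidable (Spec_flip_words_in_line line out) := by unfold Spec_flip_words_in_line; infer_instance

-- ===== CLAIM (what is proved, stated in full; the proofs are below) =====
def Claim_equal_flip_words_in_line : Prop := ∀ (line : String), Dom_flip_words_in_line line → Spec_flip_words_in_line line (flip_words_in_line line)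

-- ===== LEMMAS AND PROOFS =====

-- replace.go with a single-char pattern and empty replacement is a filter (fuel suffices)
lemma replace_go_single (p : Char) :
    ∀ (fuel : Nat) (l acc : List Char), l.length ≤ fuel →
      PySem.Chars.replace.go [p] [] fuel l acc
        = acc.reverse ++ l.filter (fun c => !(p == c)) := by
  intro fuel
  induction fuel with
  | zero =>
    intro l acc h
    have : l = [] := List.eq_nil_of_length_eq_zero (Nat.le_zero.mp h)
    subst this
    simp [PySem.Chars.replace.go]
  | succ n ih =>
    intro l acc h
    cases l with
    | nil => simp [PySem.Chars.replace.go]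
    | cons c t =>
      simp only [PySem.Chars.replace.go]
      by_cases hp : p = c
      · subst hp
        rw [if_pos (by simp [List.isPrefixOf])]
        simp only [List.length_cons] at h
        simp only [List.length_cons, List.length_nil, List.drop_succ_cons, List.drop_zero,
          List.reverse_nil, List.nil_append]
        rw [ih t acc (by omega)]
        simp
      · rw [if_neg (by simp [List.isPrefixOf, hp])]
        simp only [List.length_cons] at h
        rw [ih t (c :: acc) (by omega)]
        simp [hp]

lemma replace_single (p : Char) (w : List Char) :
    PySem.Chars.replace w [p] [] = w.filter (fun c => !(p == c)) := by
  simp only [PySem.Chars.replace]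
  rw [if_neg (by simp)]
  simpa using replace_go_single p w.length w [] (le_refl _)

-- folding single-char replaces over a list of punctuation chars filters them all out
lemma foldl_replace (ps : List Char) :
    ∀ (w : List Char),
      ps.foldl (fun w p => PySem.Chars.replace w [p] []) w
        = w.filter (fun c => !(ps.contains c)) := by
  induction ps with
  | nil => intro w; simp
  | cons p ps ih =>
    intro w
    rw [List.foldl_cons, replace_single, ih, List.filter_filter]
    apply List.filter_congr
    intro c _
    by_cases h : p = c
    · simp [h]
    · have h2 : ¬ c = p := fun e => h e.symm
      simp [h, h2, Bool.and_comm]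

-- what A computes for one word
lemma wordA_eq (w : List Char) :
    PySem.Chars.lower
      ((PySem.Chars.slice? (punctA.foldl (fun w p => PySem.Chars.replace w [p] []) w)
        none none (-1)).getD [])
      = (w.reverse.filter (fun c => !(PySem.Set.contains punctB c))).map PySem.Chars.lowerChar := by
  rw [foldl_replace]
  simp only [PySem.Chars.slice?, PySem.List.slice?_none_none_neg_one,
    Option.getD_some, PySem.Chars.lower, ← List.filter_reverse]
  have hset : punctB = (punctA : List Char) := by decide
  rw [hset]
  simp only [PySem.Set.contains_eq_listContains]

-- the append-accumulator fold is a map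
lemma foldl_append_map {α β : Type} (f : α → β) :
    ∀ (xs : List α) (acc : List β),
      xs.foldl (fun acc x => acc ++ [f x]) acc = acc ++ xs.map f := by
  intro xs
  induction xs with
  | nil => intro acc; simp
  | cons x xs ih => intro acc; simp [ih]

-- ===== VERDICT (by name: the statement is the Claim_ definition above) =====
theorem flip_words_in_line_spec : Claim_equal_flip_words_in_line := by
  intro line _
  unfold Spec_flip_words_in_line flip_words_in_line flip_words_in_line_alt
  rw [foldl_append_map, List.nil_append,
    List.map_congr_left (fun w _ => wordA_eq w)]
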